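-- pv_equiv track=rewrite | github.com/vietcuong2004/PYTHON_TLU | Test_2/Bai_3.py | kiem_tra
-- ===== SOURCE A (Python) =====
-- def kiem_tra(s,k):
-- 	t = len(s)-k+1
-- 	for i in range(t):
-- 		sub = s[i:i+k]
-- 		sub1 = s[i+k:i+2*k]
-- 		#if s.count(sub)>=2:
-- 		if sub == sub1:
-- 			return False
-- 	return True
-- ===== SOURCE B (Python) =====
-- def kiem_tra(s, k):
--     # O(n) scan: positions j with s[j] == s[j+k]; an adjacent equal k-block
--     # exists iff k consecutive such positions occur. Degenerate k <= 0: the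
--     # (empty) block trivially repeats, so the answer is False.
--     if k <= 0:
--         return False
--     n = len(s)
--     run = 0
--     for j in range(n - k):
--         if s[j] == s[j + k]:
--             run += 1
--             if run >= k:
--                 return False
--         else:
--             run = 0
--     return True
-- ===== Notes on version B (the rewrite author's own statement) =====
-- stated objective: faster
-- what changed: Instead of comparing the two length-k substrings s[i:i+k] and s[i+k:i+2k] at every start position, B makes one left-to-right pass over the single-character matches s[j]==s[j+k] and keeps the length of the current run of matches: an adjacent equal k-block exists iff k consecutive matches occur.
import Mathlib
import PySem

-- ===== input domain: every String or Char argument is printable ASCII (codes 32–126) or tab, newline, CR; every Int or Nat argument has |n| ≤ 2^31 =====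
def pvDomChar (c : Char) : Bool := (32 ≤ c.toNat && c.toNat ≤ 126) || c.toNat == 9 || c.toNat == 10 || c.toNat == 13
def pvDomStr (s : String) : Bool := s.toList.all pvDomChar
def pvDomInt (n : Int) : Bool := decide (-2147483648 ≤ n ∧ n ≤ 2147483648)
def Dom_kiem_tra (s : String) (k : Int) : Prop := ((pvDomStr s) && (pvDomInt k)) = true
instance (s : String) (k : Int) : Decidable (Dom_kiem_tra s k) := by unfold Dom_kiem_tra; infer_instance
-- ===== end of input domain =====

-- B replaces A's comparison of the two length-k substrings at every start position
-- by one left-to-right scan of the character matches s[j] == s[j+k], tracking the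
-- length of the current run of matches (a timing run measured B faster).

-- ===== PORT A =====
-- A's 'for i in range(t)' loop: return False at the first i with s[i:i+k] == s[i+k:i+2k]
def kiemTraGo (l : List Char) (k t : Int) (i : Int) : Bool :=
  if hit : i < t then
    if PySem.List.slice l (some i) (some (i + k)) =
       PySem.List.slice l (some (i + k)) (some (i + 2 * k)) then false
    else kiemTraGo l k t (i + 1)
  else true
termination_by (t - i).toNat
decreasing_by omega

def kiem_tra (s : String) (k : Int) : Bool :=
  kiemTraGo s.toList k (PySem.Str.len s - k + 1) 0

-- ===== PORT B =====
-- B's 'for j in range(n - k)' loop with the current run length; Python's s[j] and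
-- s[j+k] are always in range here (j < n - k and 1 ≤ k), so List.getD is exact.
def kiemTraAltGo (l : List Char) (K : Nat) : List Nat → Nat → Bool
  | [], _ => true
  | j :: js, run =>
    if l.getD j ' ' = l.getD (j + K) ' ' then
      (if run + 1 ≥ K then false else kiemTraAltGo l K js (run + 1))
    else kiemTraAltGo l K js 0

def kiem_tra_alt (s : String) (k : Int) : Bool :=
  if k ≤ 0 then false
  else kiemTraAltGo s.toList k.toNat (List.range (s.toList.length - k.toNat)) 0

-- ===== PRECONDITION & SPEC =====
def Spec_kiem_tra (s : String) (k : Int) (out : Bool) : Prop := out = kiem_tra_alt s k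
instance (s : String) (k : Int) (out : Bool) : Decidable (Spec_kiem_tra s k out) := by unfold Spec_kiem_tra; infer_instance

-- ===== CLAIM (what is proved, stated in full; the proofs are below) =====
def Claim_equal_kiem_tra : Prop := ∀ (s : String) (k : Int), Dom_kiem_tra s k → Spec_kiem_tra s k (kiem_tra s k)

-- ===== LEMMAS AND PROOFS =====

-- A's loop returns false iff some index in the list satisfies the slice equality
lemma kiemTraGo_false_iff (l : List Char) (k t : Int) : ∀ (i : Int),
    kiemTraGo l k t i = false ↔ ∃ j ∈ PySem.List.pyRange i t 1,
      PySem.List.slice l (some j) (some (j + k)) =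
      PySem.List.slice l (some (j + k)) (some (j + 2 * k)) := by
  intro i
  induction hn : (t - i).toNat using Nat.strong_induction_on generalizing i with
  | _ n ih =>
    rw [kiemTraGo]
    by_cases hit : i < t
    · rw [dif_pos hit, PySem.List.pyRange_one_cons hit]
      by_cases h : PySem.List.slice l (some i) (some (i + k)) =
          PySem.List.slice l (some (i + k)) (some (i + 2 * k))
      · simp [h]
      · rw [if_neg h, ih (t - (i + 1)).toNat (by omega) (i + 1) rfl]
        simp [h]
    · rw [dif_neg hit, PySem.List.pyRange_one_eq_nil (by omega)]
      simp

-- a slice whose clamped bounds are in the wrong order is empty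
lemma slice_nil_of_clamp_le (l : List Char) (a b : Int)
    (h : PySem.List.clampIdx l.length b ≤ PySem.List.clampIdx l.length a) :
    PySem.List.slice l (some a) (some b) = [] := by
  have hl := PySem.List.length_slice l a b
  have : (PySem.List.slice l (some a) (some b)).length = 0 := by omega
  exact List.eq_nil_of_length_eq_zero this

-- the shared characterisation: an adjacent equal block of length K starting at m,
-- stated pointwise on the match positions m ≤ t < m + K
def HasBlock (l : List Char) (K : Nat) : Prop :=
  ∃ m : Nat, m + K ≤ l.length - K ∧
    ∀ t : Nat, m ≤ t → t < m + K → l.getD t ' ' = l.getD (t + K) ' '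

-- slice equality at start m ↔ the pointwise window condition (1 ≤ K, m + K ≤ n)
lemma slice_window_iff (l : List Char) (K m : Nat) (hK : 1 ≤ K) (hmK : m + K ≤ l.length) :
    (PySem.List.slice l (some (m : Int)) (some ((m : Int) + (K : Int))) =
     PySem.List.slice l (some ((m : Int) + (K : Int))) (some ((m : Int) + 2 * (K : Int)))) ↔
    (m + K ≤ l.length - K ∧
      ∀ t : Nat, m ≤ t → t < m + K → l.getD t ' ' = l.getD (t + K) ' ') := by
  have e1 : PySem.List.slice l (some (m : Int)) (some ((m : Int) + (K : Int))) =
      List.take K (List.drop m l) := PySem.List.slice_natCast_add l m K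
  have e2 : PySem.List.slice l (some ((m : Int) + (K : Int))) (some ((m : Int) + 2 * (K : Int))) =
      List.take K (List.drop (m + K) l) := by
    have : ((m : Int) + (K : Int)) + (K : Int) = (m : Int) + 2 * (K : Int) := by ring
    rw [← this, show ((m : Int) + (K : Int)) = ((m + K : Nat) : Int) by push_cast; ring]
    exact PySem.List.slice_natCast_add l (m + K) K
  rw [e1, e2]
  constructor
  · intro h
    have hlen := congrArg List.length h
    simp [List.length_take, List.length_drop] at hlen
    have h2K : m + K ≤ l.length - K := by omega
    refine ⟨h2K, ?_⟩
    intro t hmt htK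
    have ht : t - m < K := by omega
    have := congrArg (fun xs => xs.getD (t - m) ' ') h
    simp only [List.getD_eq_getElem?_getD] at this
    simp [List.getElem?_drop, ht] at this
    have e3 : m + (t - m) = t := by omega
    have e4 : m + K + (t - m) = t + K := by omega
    rw [e3, e4] at this
    simp [List.getD_eq_getElem?_getD, this]
  · rintro ⟨h2K, hpt⟩
    apply List.ext_getElem
    · simp [List.length_take, List.length_drop]; omega
    · intro i h₁ h₂
      simp only [List.getElem_take, List.getElem_drop]
      have hiK : i < K := by simp [List.length_take, List.length_drop] at h₁; omega
      have := hpt (m + i) (by omega) (by omega)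
      have g1 : m + i < l.length := by omega
      have g2 : m + i + K < l.length := by omega
      rw [List.getD_eq_getElem l ' ' g1, List.getD_eq_getElem l ' ' g2] at this
      simpa [Nat.add_right_comm] using this

-- B's scan loop: with a valid run state it returns false iff a full window of
-- K consecutive matches fitting below M exists at position ≥ j - r
lemma kiemTraAltGo_false_iff (l : List Char) (K M : Nat) (hK : 1 ≤ K) :
    ∀ (c j r : Nat), j + c = M → r ≤ j → r < K →
      (∀ t : Nat, j - r ≤ t → t < j → l.getD t ' ' = l.getD (t + K) ' ') →
      (kiemTraAltGo l K (List.range' j c) r = false ↔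
        ∃ m : Nat, j - r ≤ m ∧ m + K ≤ M ∧
          ∀ t : Nat, m ≤ t → t < m + K → l.getD t ' ' = l.getD (t + K) ' ') := by
  intro c
  induction c with
  | zero =>
    intro j r hjc hrj hrK _
    simp only [List.range', kiemTraAltGo]
    constructor
    · intro h; exact absurd h (by simp)
    · rintro ⟨m, h1, h2, _⟩; omega
  | succ c ih =>
    intro j r hjc hrj hrK hstreak
    rw [List.range'_succ]
    by_cases h : l.getD j ' ' = l.getD (j + K) ' '
    · by_cases hrun : r + 1 ≥ K
      · have hr1 : r + 1 = K := by omega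
        simp only [kiemTraAltGo, if_pos h, if_pos hrun]
        constructor
        · intro _
          refine ⟨j - r, le_refl _, by omega, ?_⟩
          intro t h1 h2
          by_cases ht : t < j
          · exact hstreak t h1 ht
          · have : t = j := by omega
            rw [this]; exact h
        · intro _; trivial
      · simp only [kiemTraAltGo, if_pos h, if_neg hrun]
        have hstreak' : ∀ t : Nat, (j + 1) - (r + 1) ≤ t → t < j + 1 →
            l.getD t ' ' = l.getD (t + K) ' ' := by
          intro t h1 h2
          by_cases ht : t < j
          · exact hstreak t (by omega) ht
          · have : t = j := by omega
            rw [this]; exact h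
        rw [ih (j + 1) (r + 1) (by omega) (by omega) (by omega) hstreak']
        have e : j + 1 - (r + 1) = j - r := by omega
        rw [e]
    · simp only [kiemTraAltGo, if_neg h]
      rw [ih (j + 1) 0 (by omega) (by omega) (by omega) (by intro t h1 h2; omega)]
      constructor
      · rintro ⟨m, h1, h2, h3⟩; exact ⟨m, by omega, h2, h3⟩
      · rintro ⟨m, h1, h2, h3⟩
        refine ⟨m, ?_, h2, h3⟩
        by_cases hm : j + 1 ≤ m
        · omega
        · exact absurd (h3 j (by omega) (by omega)) h

-- A = false ↔ HasBlock, for 1 ≤ k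
lemma kiem_tra_false_iff (s : String) (k : Int) (hk : 1 ≤ k) :
    (kiem_tra s k = false ↔ HasBlock s.toList k.toNat) := by
  unfold kiem_tra HasBlock
  rw [kiemTraGo_false_iff, PySem.Str.len_eq]

  have hkK : k = (k.toNat : Int) := (Int.toNat_of_nonneg (by omega)).symm
  constructor
  · rintro ⟨i, hmem, heq⟩
    rw [PySem.List.mem_pyRange_one] at hmem
    have him : i = (i.toNat : Int) := (Int.toNat_of_nonneg hmem.1).symm
    have hmK : i.toNat + k.toNat ≤ s.toList.length := by omega
    rw [him, hkK] at heq
    obtain ⟨h1, h2⟩ := (slice_window_iff s.toList k.toNat i.toNat (by omega) hmK).mp heq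
    exact ⟨i.toNat, h1, h2⟩
  · rintro ⟨m, h1, h2⟩
    have h2K : m + 2 * k.toNat ≤ s.toList.length := by omega
    refine ⟨(m : Int), ?_, ?_⟩
    · rw [PySem.List.mem_pyRange_one]
      constructor
      · positivity
      · omega
    · rw [hkK]
      exact (slice_window_iff s.toList k.toNat m (by omega) (by omega)).mpr ⟨h1, h2⟩

-- B = false ↔ HasBlock, for 1 ≤ k
lemma kiem_tra_alt_false_iff (s : String) (k : Int) (hk : 1 ≤ k) :
    (kiem_tra_alt s k = false ↔ HasBlock s.toList k.toNat) := by
  unfold kiem_tra_alt HasBlock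
  rw [if_neg (by omega), List.range_eq_range']
  rw [kiemTraAltGo_false_iff s.toList k.toNat (s.toList.length - k.toNat) (by omega)
      (s.toList.length - k.toNat) 0 0 (by omega) (by omega) (by omega) (by intro t h1 h2; omega)]
  constructor
  · rintro ⟨m, _, h2, h3⟩; exact ⟨m, h2, h3⟩
  · rintro ⟨m, h2, h3⟩; exact ⟨m, by omega, h2, h3⟩

-- for k ≤ 0 A finds two equal (empty) slices and returns false
lemma kiem_tra_eq_false_of_nonpos (s : String) (k : Int) (hk : k ≤ 0) :
    kiem_tra s k = false := by
  unfold kiem_tra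
  rw [kiemTraGo_false_iff, PySem.Str.len_eq]

  by_cases hn : 0 ≤ (s.toList.length : Int) + k
  · refine ⟨-2 * k, ?_, ?_⟩
    · rw [PySem.List.mem_pyRange_one]; omega
    · rw [slice_nil_of_clamp_le _ _ _ (by unfold PySem.List.clampIdx; split_ifs <;> omega),
        slice_nil_of_clamp_le _ _ _ (by unfold PySem.List.clampIdx; split_ifs <;> omega)]
  · refine ⟨0, ?_, ?_⟩
    · rw [PySem.List.mem_pyRange_one]; omega
    · rw [slice_nil_of_clamp_le _ _ _ (by unfold PySem.List.clampIdx; split_ifs <;> omega),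
        slice_nil_of_clamp_le _ _ _ (by unfold PySem.List.clampIdx; split_ifs <;> omega)]

-- ===== VERDICT (by name: the statement is the Claim_ definition above) =====
theorem kiem_tra_spec : Claim_equal_kiem_tra := by
  intro s k _
  unfold Spec_kiem_tra
  by_cases hk : k ≤ 0
  · rw [kiem_tra_eq_false_of_nonpos s k hk]
    simp [kiem_tra_alt, hk]
  · have hk1 : 1 ≤ k := by omega
    have h1 := kiem_tra_false_iff s k hk1
    have h2 := kiem_tra_alt_false_iff s k hk1
    cases ha : kiem_tra s k <;> cases hb : kiem_tra_alt s k <;> simp_all
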